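-- pv_equiv track=rewrite | github.com/GillesArcas/Advent_of_Code | 2021/23.py | badpods
-- ===== SOURCE A (Python) =====
-- def badpods(podmap):
--     """
--     bad pods which can move
--     """
--     hallway, *rooms = podmap
--     pods = set()
--
--     for x, v in enumerate(hallway):
--         if v in 'ABCD':
--             pods.add((0, x))
--
--     for x, room in enumerate(rooms, 1):
--         for y, v in enumerate(room):
--             if y > 0 and any(_ != '.' for _ in room[:y]):
--                 continue
--             if v in 'ABCD' and v != '.ABCD'[x]:
--                 pods.add((x, y))
--             if v in 'ABCD' and v == '.ABCD'[x]:
--                 if any(w != v for w in room[y + 1:]):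
--                     pods.add((x, y))
--
--     return pods
-- ===== SOURCE B (Python) =====
-- def badpods(podmap):
--     """
--     bad pods which can move
--     """
--     hallway = podmap[0]
--     pods = [(0, x) for x, v in enumerate(hallway) if v in 'ABCD']
--     for x in range(1, len(podmap)):
--         room = podmap[x]
--         y = 0
--         while y < len(room) and room[y] == '.':
--             y += 1
--         if y < len(room):
--             v = room[y]
--             if v in 'ABCD' and (v != '.ABCD'[x] or room[y + 1:].count(v) != len(room) - (y + 1)):
--                 pods.append((x, y))
--     return set(pods)
-- ===== Notes on version B (the rewrite author's own statement) =====
-- stated objective: faster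
-- what changed: B builds a flat candidate list (hallway comprehension, then per room a single while-scan to the topmost occupied cell plus a count test on the cells below) and returns set(list) at the end, instead of A's set accumulated by a per-depth loop that re-scans the whole room prefix at every depth with any().
import Mathlib
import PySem

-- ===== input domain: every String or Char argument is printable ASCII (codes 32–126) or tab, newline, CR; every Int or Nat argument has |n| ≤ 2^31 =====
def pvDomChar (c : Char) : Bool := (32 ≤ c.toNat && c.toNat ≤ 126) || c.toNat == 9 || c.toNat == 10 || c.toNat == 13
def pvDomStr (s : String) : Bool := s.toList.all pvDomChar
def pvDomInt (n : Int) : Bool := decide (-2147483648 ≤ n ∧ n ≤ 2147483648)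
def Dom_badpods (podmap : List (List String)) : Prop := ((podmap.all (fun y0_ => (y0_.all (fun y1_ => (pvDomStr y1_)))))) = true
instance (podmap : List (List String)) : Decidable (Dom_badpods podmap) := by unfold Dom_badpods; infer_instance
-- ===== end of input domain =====

-- B builds a flat candidate list (hallway comprehension, then per room a single while-scan to the
-- topmost occupied cell with a count test on the cells below) and returns set(list), instead of
-- A's set accumulated by a per-depth loop that re-scans the whole room prefix at every depth.

-- ===== PORT A =====
-- '.ABCD'[x] as a 1-character string; Python raises IndexError out of range (excluded by Pre_),
-- the junk value "!" is then never compared against a cell that passes the 'in ABCD' test.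
def pvTarget (x : Int) : String :=
  match PySem.Str.pyGet? ".ABCD" x with
  | some c => String.ofList [c]
  | none => "!"

def badpods (podmap : List (List String)) : List (Int × Int) :=
  match podmap with
  | [] => []  -- Python: 'hallway, *rooms = podmap' raises ValueError here; excluded by Pre_
  | hallway :: rooms =>
    let pods : PySem.Set (Int × Int) := PySem.Set.empty
    let pods := (PySem.List.enumerate hallway).foldl
      (fun (pods : PySem.Set (Int × Int)) p => if PySem.Str.isIn p.2 "ABCD" then pods.add (0, p.1) else pods) pods
    let pods := (PySem.List.enumerate rooms 1).foldl
      (fun (pods : PySem.Set (Int × Int)) p =>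
        (PySem.List.enumerate p.2).foldl
          (fun (pods : PySem.Set (Int × Int)) q =>
            if 0 < q.1 ∧ ((PySem.List.slice p.2 none (some q.1)).any (fun c => c != ".")) = true
            then pods  -- continue
            else
              let pods :=
                if PySem.Str.isIn q.2 "ABCD" ∧ q.2 ≠ pvTarget p.1
                then pods.add (p.1, q.1) else pods
              if PySem.Str.isIn q.2 "ABCD" ∧ q.2 = pvTarget p.1 then
                if ((PySem.List.slice p.2 (some (q.1 + 1)) none).any (fun w => w != q.2)) = true
                then pods.add (p.1, q.1) else pods
              else pods) pods) pods
    pods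

-- ===== PORT B =====
-- pods = [(0, x) for x, v in enumerate(hallway) if v in 'ABCD'] — structural recursion with the counter x
def altHall (hallway : List String) (i : Int) : List (Int × Int) :=
  match hallway with
  | [] => []
  | v :: rest => (if PySem.Str.isIn v "ABCD" then [((0 : Int), i)] else []) ++ altHall rest (i + 1)

-- the while loop 'y = 0; while y < len(room) and room[y] == ".": y += 1':
-- returns the final y together with the suffix room[y:] (empty iff y == len(room))
def altScan (room : List String) (y : Nat) : Nat × List String :=
  match room with
  | [] => (y, [])
  | c :: rest => if c == "." then altScan rest (y + 1) else (y, c :: rest)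

-- body of one iteration of 'for x in range(1, len(podmap))': the ≤1 candidates this room appends
def altRoom (room : List String) (x : Int) : List (Int × Int) :=
  match altScan room 0 with
  | (_, []) => []  -- y == len(room): room all '.', nothing appended
  | (y, v :: _) =>
    if PySem.Str.isIn v "ABCD" ∧
        (v ≠ pvTarget x ∨
          ((PySem.List.count (PySem.List.slice room (some ((y : Int) + 1)) none) v : Int)
            ≠ (room.length : Int) - ((y : Int) + 1)))
    then [(x, (y : Int))] else []

-- the loop over rooms, carrying x (room = podmap[x] for x = 1, 2, …)
def altRooms (rooms : List (List String)) (x : Int) : List (Int × Int) :=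
  match rooms with
  | [] => []
  | room :: rest => altRoom room x ++ altRooms rest (x + 1)

def badpods_alt (podmap : List (List String)) : List (Int × Int) :=
  match podmap with
  | [] => []  -- Python: 'podmap[0]' raises IndexError here; excluded by Pre_
  | hallway :: rooms => PySem.Set.ofList (altHall hallway 0 ++ altRooms rooms 1)

-- ===== PRECONDITION & SPEC =====
-- Pre_ excludes exactly the inputs where the Python raises: the empty podmap (the unpacking
-- 'hallway, *rooms = podmap' raises ValueError) and podmaps where some room at index ≥ 5 has a
-- topmost non-'.' cell that is a substring of 'ABCD' (then '.ABCD'[x] raises IndexError).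
def Pre_badpods (podmap : List (List String)) : Prop :=
  podmap ≠ [] ∧
  ∀ p ∈ PySem.List.enumerate podmap.tail 1, 5 ≤ p.1 →
    ∀ q ∈ PySem.List.enumerate p.2,
      ((PySem.List.slice p.2 none (some q.1)).all (fun c => c == ".")) = true →
      q.2 ≠ "." → PySem.Str.isIn q.2 "ABCD" = false
instance (podmap : List (List String)) : Decidable (Pre_badpods podmap) := by
  unfold Pre_badpods; infer_instance

def pvWitness_badpods : List (List String) := [["."], ["A", "B"]]

def Spec_badpods (podmap : List (List String)) (out : List (Int × Int)) : Prop := out = badpods_alt podmap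
instance (podmap : List (List String)) (out : List (Int × Int)) : Decidable (Spec_badpods podmap out) := by unfold Spec_badpods; infer_instance

-- ===== CLAIM (what is proved, stated in full; the proofs are below) =====
def Claim_equal_badpods : Prop := ∀ (podmap : List (List String)), Dom_badpods podmap → Pre_badpods podmap → Spec_badpods podmap (badpods podmap)

-- ===== LEMMAS AND PROOFS =====

-- a fold whose step fixes every list element fixes the accumulator
theorem pv_foldl_id {α β : Type} (l : List β) (f : α → β → α)
    (h : ∀ q ∈ l, ∀ s, f s q = s) (s : α) : l.foldl f s = s := by
  induction l generalizing s with
  | nil => rfl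
  | cons b t ih =>
    simp only [List.foldl_cons, h b (by simp), ih (fun q hq s => h q (by simp [hq]) s)]

-- A's inner step is the identity on a '.' cell
theorem pv_stepA_dot (room : List String) (x : Int) (q : Int × String) (hq : q.2 = ".")
    (s : PySem.Set (Int × Int)) :
    (if 0 < q.1 ∧ ((PySem.List.slice room none (some q.1)).any (fun c => c != ".")) = true
     then s
     else
       let s' :=
         if PySem.Str.isIn q.2 "ABCD" ∧ q.2 ≠ pvTarget x then s.add (x, q.1) else s
       if PySem.Str.isIn q.2 "ABCD" ∧ q.2 = pvTarget x then
         if ((PySem.List.slice room (some (q.1 + 1)) none).any (fun w => w != q.2)) = true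
         then s'.add (x, q.1) else s'
       else s') = s := by
  obtain ⟨i, c⟩ := q
  simp only at hq
  subst hq
  have h1 : PySem.Chars.isIn ['.'] ['A', 'B', 'C', 'D'] = false := by decide
  simp [h1]

-- A's inner fold reduced to the first non-'.' cell
theorem badpods_inner_eq (x : Int) (room : List String) (s : PySem.Set (Int × Int)) :
    (PySem.List.enumerate room).foldl
      (fun (pods : PySem.Set (Int × Int)) q =>
        if 0 < q.1 ∧ ((PySem.List.slice room none (some q.1)).any (fun c => c != ".")) = true
        then pods
        else
          let pods :=
            if PySem.Str.isIn q.2 "ABCD" ∧ q.2 ≠ pvTarget x then pods.add (x, q.1) else pods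
          if PySem.Str.isIn q.2 "ABCD" ∧ q.2 = pvTarget x then
            if ((PySem.List.slice room (some (q.1 + 1)) none).any (fun w => w != q.2)) = true
            then pods.add (x, q.1) else pods
          else pods) s =
    (match (PySem.List.enumerate room).find? (fun q => q.2 != ".") with
     | none => s
     | some (y, v) =>
       if PySem.Str.isIn v "ABCD" ∧
           (v ≠ pvTarget x ∨ ((PySem.List.slice room (some (y + 1)) none).any (fun w => w != v)) = true)
       then s.add (x, y) else s) := by
  cases hf : (PySem.List.enumerate room).find? (fun q => q.2 != ".") with
  | none =>
    have hall := List.find?_eq_none.mp hf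
    exact pv_foldl_id _ _ (fun q hq s => pv_stepA_dot room x q (by
      have := hall q hq; simpa using this) s) s
  | some yv =>
    obtain ⟨y, v⟩ := yv
    rw [List.find?_eq_some_iff_append] at hf
    obtain ⟨hpred, L1, L2, hsplit, hL1⟩ := hf
    have hvdot : v ≠ "." := by simpa using hpred
    have hL1dot : ∀ q ∈ L1, q.2 = "." := by
      intro q hq; have := hL1 q hq; simpa using this
    -- identify y and v from the position L1.length in the enumeration
    have hyv? : (PySem.List.enumerate room)[L1.length]? = some (y, v) := by
      rw [hsplit, List.getElem?_append_right (le_refl _)]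
      simp
    have h2 := PySem.List.getElem?_enumerate room 0 L1.length
    rw [hyv?] at h2
    have hroomk : room[L1.length]? = some v ∧ y = (L1.length : Int) := by
      cases hr : room[L1.length]? with
      | none => rw [hr] at h2; simp at h2
      | some r =>
        rw [hr] at h2
        simp only [Option.map_some, Option.some.injEq, Prod.mk.injEq] at h2
        exact ⟨congrArg _ h2.2.symm, by omega⟩
    have hv : room[L1.length]? = some v := hroomk.1
    have hy : y = (L1.length : Int) := hroomk.2
    -- the prefix of room below position L1.length is all '.'
    have hprefix : ∀ j, j < L1.length → room[j]? = some "." := by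
      intro j hj
      have hj? : (PySem.List.enumerate room)[j]? = some (L1[j]'hj) := by
        rw [hsplit, List.getElem?_append_left (by simpa using hj)]
        exact List.getElem?_eq_getElem hj
      have h3 := PySem.List.getElem?_enumerate room 0 j
      rw [hj?] at h3
      cases hr : room[j]? with
      | none => rw [hr] at h3; simp at h3
      | some r =>
        rw [hr] at h3
        simp only [Option.map_some, Option.some.injEq] at h3
        have hdot := hL1dot (L1[j]'hj) (List.getElem_mem hj)
        rw [h3] at hdot
        simp only at hdot
        rw [hdot]
    -- elements of L2 sit at indices above L1.length (pairwise-increasing indices)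
    have hpair : (PySem.List.enumerate room).Pairwise (fun p q => p.1 < q.1) :=
      PySem.List.pairwise_lt_enumerate room 0
    rw [hsplit] at hpair
    have hL2gt : ∀ q ∈ L2, y < q.1 := by
      have := (List.pairwise_append.mp hpair).2.1
      intro q hq
      exact (List.pairwise_cons.mp this).1 q hq
    -- run the fold: L1 is inert, the hit cell acts, L2 is inert
    rw [hsplit, List.foldl_append, List.foldl_cons]
    rw [pv_foldl_id L1 _ (fun q hq s => pv_stepA_dot room x q (hL1dot q hq) s) s]
    -- L2 elements are skipped: their prefix slice contains v ≠ '.'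
    have hL2skip : ∀ q ∈ L2, ∀ s : PySem.Set (Int × Int),
        (if 0 < q.1 ∧ ((PySem.List.slice room none (some q.1)).any (fun c => c != ".")) = true
         then s
         else
           let s' :=
             if PySem.Str.isIn q.2 "ABCD" ∧ q.2 ≠ pvTarget x then s.add (x, q.1) else s
           if PySem.Str.isIn q.2 "ABCD" ∧ q.2 = pvTarget x then
             if ((PySem.List.slice room (some (q.1 + 1)) none).any (fun w => w != q.2)) = true
             then s'.add (x, q.1) else s'
           else s') = s := by
      intro q hq s
      have hgt : (L1.length : Int) < q.1 := hy ▸ hL2gt q hq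
      have hmemq : q ∈ PySem.List.enumerate room 0 := by
        rw [hsplit]; simp [hq]
      obtain ⟨k, hk, hqe⟩ := (PySem.List.mem_enumerate_iff room 0 q).mp hmemq
      have hq1k : q.1 = (k : Int) := by rw [hqe]; simp
      have hq1 : (0 : Int) < q.1 := by omega
      have hLk : L1.length < k := by rw [hq1k] at hgt; exact_mod_cast hgt
      have hsl : PySem.List.slice room none (some q.1) = room.take k := by
        rw [hq1k]; exact PySem.List.slice_to_natCast room k
      have hvin : v ∈ room.take k := by
        refine List.mem_of_getElem? (i := L1.length) ?_
        rw [List.getElem?_take_of_lt hLk]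
        exact hv
      have : ((PySem.List.slice room none (some q.1)).any (fun c => c != ".")) = true := by
        rw [hsl, List.any_eq_true]
        exact ⟨v, hvin, by simpa using hvdot⟩
      simp [hq1, this]
    rw [pv_foldl_id L2 _ hL2skip]
    -- the hit cell: its prefix slice is all '.', so it is considered; A's two ifs = B's one if
    have hslv : PySem.List.slice room none (some y) = room.take L1.length := by
      rw [hy]; exact PySem.List.slice_to_natCast room L1.length
    have hskip : ¬ (0 < y ∧ ((PySem.List.slice room none (some y)).any (fun c => c != ".")) = true) := by
      rintro ⟨-, hany⟩
      rw [hslv, List.any_eq_true] at hany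
      obtain ⟨c, hc, hcne⟩ := hany
      obtain ⟨j, hj⟩ := List.mem_iff_getElem?.mp hc
      have hjlt : j < L1.length := by
        by_contra hge
        rw [List.getElem?_take] at hj
        simp [if_neg (by omega : ¬ j < L1.length)] at hj
      rw [List.getElem?_take_of_lt hjlt, hprefix j hjlt] at hj
      simp only [Option.some.injEq] at hj
      rw [← hj] at hcne
      simp at hcne
    simp only [if_neg hskip]
    by_cases hin : PySem.Chars.isIn v.toList ['A', 'B', 'C', 'D'] = true
    · by_cases heq : v = pvTarget x
      · by_cases hex : ∃ w ∈ PySem.List.slice room (some (y + 1)), ¬ w = pvTarget x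
        · simp [heq, hex]
        · simp [heq, hex]
      · simp [hin, heq]
    · simp [hin]

-- the while-scan reaches the first non-'.' suffix of the room
theorem altScan_drop (room : List String) (n : Nat) :
    ∃ k, altScan room n = (n + k, room.drop k) := by
  induction room generalizing n with
  | nil => exact ⟨0, rfl⟩
  | cons c rest ih =>
    by_cases hc : c = "."
    · obtain ⟨k, hk⟩ := ih (n + 1)
      exact ⟨k + 1, by simp [altScan, hc, hk]; omega⟩
    · exact ⟨0, by simp [altScan, hc]⟩

-- the while-scan computes find?'s first non-'.' hit
theorem altScan_find (room : List String) (n : Nat) :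
    (PySem.List.enumerate room (n : Int)).find? (fun q => q.2 != ".") =
      (match altScan room n with
       | (_, []) => none
       | (y, v :: _) => some ((y : Int), v)) := by
  induction room generalizing n with
  | nil => simp [PySem.List.enumerate_nil, altScan]
  | cons c rest ih =>
    rw [PySem.List.enumerate_cons]
    by_cases hc : c = "."
    · subst hc
      rw [List.find?_cons_of_neg (by simp)]
      have := ih (n + 1)
      rw [show ((n + 1 : Nat) : Int) = (n : Int) + 1 by push_cast; ring] at this
      simpa [altScan] using this
    · rw [List.find?_cons_of_pos (by simpa using hc)]
      simp [altScan, hc]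

-- A's hallway loop builds exactly B's hallway comprehension
theorem hall_fold (hallway : List String) (i : Int) (s : PySem.Set (Int × Int)) :
    (PySem.List.enumerate hallway i).foldl
      (fun (pods : PySem.Set (Int × Int)) p =>
        if PySem.Str.isIn p.2 "ABCD" then pods.add (0, p.1) else pods) s
    = (altHall hallway i).foldl PySem.Set.add s := by
  induction hallway generalizing i s with
  | nil => simp [PySem.List.enumerate_nil, altHall]
  | cons v rest ih =>
    rw [PySem.List.enumerate_cons, List.foldl_cons]
    unfold altHall
    by_cases hv : PySem.Str.isIn v "ABCD" = true
    · simp only [hv, if_pos, List.foldl_append, List.foldl_cons, List.foldl_nil]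
      exact ih (i + 1) _
    · simp only [Bool.not_eq_true] at hv
      simp only [hv, Bool.false_eq_true, if_false, List.nil_append]
      exact ih (i + 1) s

-- one room of A's loop (in find?-form) appends exactly B's altRoom candidates
theorem room_step (room : List String) (x : Int) (s : PySem.Set (Int × Int)) :
    (match (PySem.List.enumerate room).find? (fun q => q.2 != ".") with
     | none => s
     | some (y, v) =>
       if PySem.Str.isIn v "ABCD" ∧
           (v ≠ pvTarget x ∨ ((PySem.List.slice room (some (y + 1)) none).any (fun w => w != v)) = true)
       then s.add (x, y) else s)
    = (altRoom room x).foldl PySem.Set.add s := by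
  have hfind := altScan_find room 0
  rw [show ((0 : Nat) : Int) = 0 by norm_num] at hfind
  obtain ⟨k, hk⟩ := altScan_drop room 0
  rw [Nat.zero_add] at hk
  unfold altRoom
  rw [hfind, hk]
  cases hd : room.drop k with
  | nil => simp
  | cons v tail =>
    dsimp only
    have hklen : k < room.length := by
      by_contra hge
      rw [List.drop_eq_nil_iff.mpr (by omega)] at hd
      simp at hd
    have htail : room.drop (k + 1) = tail := by
      have := congrArg List.tail hd
      rwa [List.tail_drop] at this
    have hslice : PySem.List.slice room (some ((k : Int) + 1)) none = tail := by
      rw [show ((k : Int) + 1) = ((k + 1 : Nat) : Int) by push_cast; ring,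
        PySem.List.slice_from_natCast, htail]
    have hlen : (room.length : Int) - ((k : Int) + 1) = (tail.length : Int) := by
      have : tail.length = room.length - (k + 1) := by
        rw [← htail, List.length_drop]
      omega
    have hcond : (((PySem.List.slice room (some ((k : Int) + 1)) none).any (fun w => w != v)) = true)
        ↔ ((PySem.List.count (PySem.List.slice room (some ((k : Int) + 1)) none) v : Int)
            ≠ (room.length : Int) - ((k : Int) + 1)) := by
      rw [hslice, hlen, PySem.List.count_eq]
      constructor
      · rintro hany heq
        rw [List.any_eq_true] at hany
        obtain ⟨w, hw, hwne⟩ := hany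
        have : tail.count v = tail.length := by exact_mod_cast heq
        have := List.count_eq_length.mp this w hw
        simp [this] at hwne
      · intro hne
        by_contra hnot
        have hall : ∀ w ∈ tail, v = w := by
          intro w hw
          by_contra hwv
          exact hnot (List.any_eq_true.mpr ⟨w, hw, by simpa using fun h => hwv h.symm⟩)
        exact hne (by exact_mod_cast List.count_eq_length.mpr hall)
    by_cases hin : PySem.Str.isIn v "ABCD" = true
    · by_cases hor : v ≠ pvTarget x ∨
          ((PySem.List.slice room (some ((k : Int) + 1)) none).any (fun w => w != v)) = true
      · rw [if_pos ⟨hin, hor⟩, if_pos ⟨hin, by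
          rcases hor with h | h
          · exact Or.inl h
          · exact Or.inr (hcond.mp h)⟩]
        simp only [List.foldl_cons, List.foldl_nil]
      · rw [if_neg (by tauto), if_neg (by
          rintro ⟨-, h | h⟩
          · exact hor (Or.inl h)
          · exact hor (Or.inr (hcond.mpr h)))]
        simp
    · rw [if_neg (by tauto), if_neg (by tauto)]
      simp
-- A's loop over rooms appends exactly B's altRooms candidates
theorem rooms_fold (rooms : List (List String)) (x : Int) (s : PySem.Set (Int × Int)) :
    (PySem.List.enumerate rooms x).foldl
      (fun (pods : PySem.Set (Int × Int)) p =>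
        (PySem.List.enumerate p.2).foldl
          (fun (pods : PySem.Set (Int × Int)) q =>
            if 0 < q.1 ∧ ((PySem.List.slice p.2 none (some q.1)).any (fun c => c != ".")) = true
            then pods
            else
              let pods :=
                if PySem.Str.isIn q.2 "ABCD" ∧ q.2 ≠ pvTarget p.1
                then pods.add (p.1, q.1) else pods
              if PySem.Str.isIn q.2 "ABCD" ∧ q.2 = pvTarget p.1 then
                if ((PySem.List.slice p.2 (some (q.1 + 1)) none).any (fun w => w != q.2)) = true
                then pods.add (p.1, q.1) else pods
              else pods) pods) s
    = (altRooms rooms x).foldl PySem.Set.add s := by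
  induction rooms generalizing x s with
  | nil => simp [PySem.List.enumerate_nil, altRooms]
  | cons room rest ih =>
    rw [PySem.List.enumerate_cons, List.foldl_cons]
    unfold altRooms
    rw [List.foldl_append, badpods_inner_eq, room_step]
    exact ih (x + 1) _

-- ===== VERDICT (by name: the statement is the Claim_ definition above) =====
theorem badpods_spec : Claim_equal_badpods := by
  intro podmap _ hpre
  unfold Spec_badpods
  match podmap with
  | [] => exact absurd rfl hpre.1
  | hallway :: rooms =>
    unfold badpods badpods_alt
    simp only
    rw [hall_fold, rooms_fold, ← List.foldl_append, PySem.Set.ofList_eq_foldl]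
    rfl
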